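-- pv_equiv track=rewrite | github.com/Youth-Research-Center/PandaPlot | test_column_position_adjustment.py | adjust_positions_for_consecutive_inserts
-- ===== SOURCE A (Python) =====
-- def adjust_positions_for_consecutive_inserts(positions):
--     """
--     Test version of the position adjustment method.
--     """
--     if len(positions) <= 1:
--         return positions.copy()
--
--     # Sort positions with their original indices to maintain correspondence with column_names
--     indexed_positions = list(enumerate(positions))
--     indexed_positions.sort(key=lambda x: x[1])  # Sort by position
--
--     adjusted = {}
--
--     # Process positions from left to right
--     for i, (original_index, pos) in enumerate(indexed_positions):
--         # Count how many columns were inserted to the left of this position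
--         insertions_to_left = sum(1 for j in range(i) if indexed_positions[j][1] <= pos)
--         adjusted[original_index] = pos + insertions_to_left
--
--     # Return adjusted positions in original order
--     return [adjusted[i] for i in range(len(positions))]
-- ===== SOURCE B (Python) =====
-- def adjust_positions_for_consecutive_inserts(positions):
--     """One pass over the stably sorted positions: the number of earlier
--     insertions is just the rank in that order, so write pos + rank directly
--     into a preallocated result (no inner scan, no dict)."""
--     n = len(positions)
--     if n <= 1:
--         return positions.copy()
--     res = [0] * n
--     for rank, (idx, pos) in enumerate(sorted(enumerate(positions), key=lambda t: t[1])):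
--         res[idx] = pos + rank
--     return res
-- ===== Notes on version B (the rewrite author's own statement) =====
-- stated objective: faster
-- what changed: On the stably sorted positions the inner left-insertion count always equals the rank, so B drops the O(n) inner scan and the dict: one pass over the sorted list writes pos + rank straight into a preallocated result list.
import Mathlib
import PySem

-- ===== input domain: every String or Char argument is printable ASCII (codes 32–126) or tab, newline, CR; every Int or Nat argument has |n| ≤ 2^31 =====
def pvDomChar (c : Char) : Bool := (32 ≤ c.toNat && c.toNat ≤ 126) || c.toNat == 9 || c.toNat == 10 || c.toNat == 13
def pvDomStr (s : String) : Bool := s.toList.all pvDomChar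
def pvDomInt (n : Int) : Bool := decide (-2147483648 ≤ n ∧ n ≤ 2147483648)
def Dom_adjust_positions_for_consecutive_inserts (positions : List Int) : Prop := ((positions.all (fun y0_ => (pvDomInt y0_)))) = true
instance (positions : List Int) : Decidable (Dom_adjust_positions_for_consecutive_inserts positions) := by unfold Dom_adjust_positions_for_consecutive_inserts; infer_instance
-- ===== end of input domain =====

-- B replaces A's quadratic inner count (which on the sorted list always equals the rank)
-- by one pass writing pos + rank into a preallocated result: O(n log n) instead of O(n^2).

-- ===== PORT A =====
-- Literal port of A. The final 'adjusted[i]' dict lookup is ported as getD 0: every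
-- i in range(n) is a key of the dict (the fsts of enumerate positions), so the
-- default is never used and Python's KeyError never fires — A is total.
def adjust_positions_for_consecutive_inserts (positions : List Int) : List Int :=
  if positions.length ≤ 1 then positions
  else
    let indexed_positions := PySem.List.sorted (PySem.List.enumerate positions) (fun x => x.2)
    let adjusted :=
      (PySem.List.enumerate indexed_positions).foldl
        (fun (d : PySem.Dict Int Int) x =>
          let i := x.1
          let original_index := x.2.1
          let pos := x.2.2
          let insertions_to_left :=
            ((PySem.List.pyRange 0 i).map
              (fun j => if (PySem.List.pyGetD indexed_positions j (0, 0)).2 ≤ pos then (1 : Int) else 0)).sum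
          d.insert original_index (pos + insertions_to_left))
        PySem.Dict.empty
    (PySem.List.pyRange 0 positions.length).map (fun i => adjusted.getD i 0)

-- ===== PORT B =====
def adjust_positions_for_consecutive_inserts_alt (positions : List Int) : List Int :=
  if positions.length ≤ 1 then positions
  else
    (PySem.List.enumerate (PySem.List.sorted (PySem.List.enumerate positions) (fun t => t.2))).foldl
      (fun res x => PySem.List.pySetD res x.2.1 (x.2.2 + x.1))
      (List.replicate positions.length 0)

-- ===== PRECONDITION & SPEC =====
def Spec_adjust_positions_for_consecutive_inserts (positions : List Int) (out : List Int) : Prop := out = adjust_positions_for_consecutive_inserts_alt positions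
instance (positions : List Int) (out : List Int) : Decidable (Spec_adjust_positions_for_consecutive_inserts positions out) := by unfold Spec_adjust_positions_for_consecutive_inserts; infer_instance

-- ===== CLAIM (what is proved, stated in full; the proofs are below) =====
def Claim_equal_adjust_positions_for_consecutive_inserts : Prop := ∀ (positions : List Int), Dom_adjust_positions_for_consecutive_inserts positions → Spec_adjust_positions_for_consecutive_inserts positions (adjust_positions_for_consecutive_inserts positions)

-- ===== LEMMAS AND PROOFS =====

-- On the key-sorted list, the inner count of earlier entries with key ≤ pos is the rank itself.
theorem pv_count_eq_rank (L : List (Int × Int))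
    (hp : L.Pairwise (fun a b => a.2 ≤ b.2)) (k : Nat) (hk : k < L.length) :
    ((PySem.List.pyRange 0 (k : Int)).map
       (fun j => if (PySem.List.pyGetD L j (0, 0)).2 ≤ (L[k]).2 then (1 : Int) else 0)).sum
      = (k : Int) := by
  rw [PySem.List.pyRange_zero_natCast, List.map_map]
  have hcongr := List.map_congr_left (l := List.range k)
    (f := (fun j => if (PySem.List.pyGetD L j (0, 0)).2 ≤ (L[k]).2 then (1 : Int) else 0) ∘ fun j => (j : Int))
    (g := fun _ => (1 : Int)) ?_
  · rw [hcongr, PySem.List.sum_map_const_int]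
    simp
  · intro j hj
    have hjk : j < k := List.mem_range.mp hj
    have hjL : j < L.length := lt_trans hjk hk
    have hget : PySem.List.pyGetD L ((j : Nat) : Int) (0, 0) = L[j] := by
      rw [PySem.List.pyGetD_natCast]
      exact List.getD_eq_getElem L (0,0) hjL
    have hle : (L[j]).2 ≤ (L[k]).2 := List.pairwise_iff_getElem.mp hp j k hjL hk hjk
    simp only [Function.comp_apply, hget, hle, if_true]

-- Generic fold correspondence: writing values keyed by x.2.1 into a dict and reading
-- it back over range n equals writing them into a length-n list directly.
theorem pv_fold_dict_eq_fold_set (n : Nat) (E : List (Int × Int × Int)) (v : Int × Int × Int → Int)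
    (hk : ∀ x ∈ E, 0 ≤ x.2.1 ∧ x.2.1 < (n : Int))
    (d0 : PySem.Dict Int Int) (r0 : List Int)
    (h0 : r0 = (List.range n).map (fun (k : Nat) => d0.getD (k : Int) 0)) :
    E.foldl (fun res x => PySem.List.pySetD res x.2.1 (v x)) r0
      = (List.range n).map
          (fun (k : Nat) => (E.foldl (fun d x => d.insert x.2.1 (v x)) d0).getD (k : Int) 0) := by
  induction E generalizing d0 r0 with
  | nil => simpa using h0
  | cons x E ih =>
    simp only [List.foldl_cons]
    refine ih (fun y hy => hk y (List.mem_cons_of_mem _ hy)) _ _ ?_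
    obtain ⟨hx0, hxn⟩ := hk x (List.mem_cons_self)
    have hr0len : r0.length = n := by rw [h0]; simp
    have hps : PySem.List.pySetD r0 x.2.1 (v x) = r0.set x.2.1.toNat (v x) :=
      PySem.List.pySetD_of_nonneg _ _ hx0
    rw [hps]
    apply List.ext_getElem
    · simp [hr0len]
    · intro i hi hi'
      have hin : i < n := by
        have := hi; rw [List.length_set, hr0len] at this; exact this
      rw [List.getElem_set, List.getElem_map, List.getElem_range,
        PySem.Dict.getD_insert]
      by_cases hEq : x.2.1.toNat = i
      · have h2 : ((i : Nat) : Int) = x.2.1 := by omega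
        rw [if_pos hEq, if_pos h2]
      · have h2 : ¬ (((i : Nat) : Int) = x.2.1) := by omega
        rw [if_neg hEq, if_neg h2]
        simp [h0]

theorem adjust_positions_A_eq_B (positions : List Int) :
    adjust_positions_for_consecutive_inserts positions
      = adjust_positions_for_consecutive_inserts_alt positions := by
  unfold adjust_positions_for_consecutive_inserts adjust_positions_for_consecutive_inserts_alt
  by_cases hlen : positions.length ≤ 1
  · simp [hlen]
  · simp only [hlen, if_false]
    set L := PySem.List.sorted (PySem.List.enumerate positions) (fun t => t.2) with hL
    have hLlen : L.length = positions.length := by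
      simp [hL, PySem.List.length_sorted, PySem.List.length_enumerate]
    have hpair : L.Pairwise (fun a b => a.2 ≤ b.2) :=
      PySem.List.sorted_pairwise (PySem.List.enumerate positions) (fun t => t.2)
    -- every key (original index) of L lies in [0, n)
    have hkey : ∀ p ∈ L, 0 ≤ p.1 ∧ p.1 < (positions.length : Int) := by
      intro p hp
      have hp' : p ∈ PySem.List.enumerate positions 0 :=
        (PySem.List.sorted_perm (PySem.List.enumerate positions) (fun t => t.2) false).mem_iff.mp hp
      obtain ⟨k, hk, rfl⟩ := (PySem.List.mem_enumerate_iff positions 0 p).mp hp'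
      refine ⟨by simp, ?_⟩
      simp
      omega
    -- replace the inner count by the rank, elementwise over the enumeration of L
    have hfold :
        (PySem.List.enumerate L).foldl
          (fun (d : PySem.Dict Int Int) x =>
            d.insert x.2.1 (x.2.2 +
              ((PySem.List.pyRange 0 x.1).map
                (fun j => if (PySem.List.pyGetD L j (0, 0)).2 ≤ x.2.2 then (1 : Int) else 0)).sum))
          PySem.Dict.empty
        = (PySem.List.enumerate L).foldl
            (fun (d : PySem.Dict Int Int) x => d.insert x.2.1 (x.2.2 + x.1))
            PySem.Dict.empty := by
      apply PySem.List.foldl_congr_mem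
      intro acc x hx
      obtain ⟨k, hk, rfl⟩ := (PySem.List.mem_enumerate_iff L 0 x).mp hx
      simp only [zero_add]
      rw [pv_count_eq_rank L hpair k hk]
    rw [hfold]
    rw [PySem.List.pyRange_zero_natCast, List.map_map]
    simp only [Function.comp_def]
    rw [← pv_fold_dict_eq_fold_set positions.length (PySem.List.enumerate L)
          (fun x => x.2.2 + x.1)
          (fun x hx => by
            have : x.2 ∈ L := by
              obtain ⟨k, hk, rfl⟩ := (PySem.List.mem_enumerate_iff L 0 x).mp hx
              exact List.getElem_mem hk
            exact hkey _ this)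
          PySem.Dict.empty (List.replicate positions.length 0)
          (by simp [PySem.Dict.getD_empty, List.map_const'])]

-- ===== VERDICT (by name: the statement is the Claim_ definition above) =====
theorem adjust_positions_for_consecutive_inserts_spec : Claim_equal_adjust_positions_for_consecutive_inserts := by
  intro positions _
  unfold Spec_adjust_positions_for_consecutive_inserts
  exact adjust_positions_A_eq_B positions
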